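-- pv_equiv track=rewrite | github.com/Fermansky/gsmis2csv | gsmis2csv.py | translate_weeks
-- ===== SOURCE A (Python) =====
-- def translate_weeks(week_string):
--     start = None
--     end = None
--     result = []
--
--     for i in range(len(week_string)):
--         if week_string[i] == '1':
--             if start is None:
--                 start = i + 1  # 找到起始点
--             end = i + 1  # 更新终止点
--         elif start is not None:
--             # 当前是 '0' 并且之前有起始点
--             if start == end:
--                 result.append(str(start))
--             else:
--                 result.append(f"{start}-{end}")
--             start = None
--             end = None
--
--     # 处理字符串末尾的连续 '1'
--     if start is not None:
--         if start == end:
--             result.append(str(start))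
--         else:
--             result.append(f"{start}-{end}")
--
--     return "、".join(result)
-- ===== SOURCE B (Python) =====
-- def translate_weeks(week_string):
--     ones = [i + 1 for i, c in enumerate(week_string) if c == '1']
--     starts = [q for p, q in zip([None] + ones, ones) if p != q - 1]
--     ends = [p for p, q in zip(ones, ones[1:] + [None]) if q != p + 1]
--     return "、".join(str(s) if s == e else f"{s}-{e}" for s, e in zip(starts, ends))
-- ===== Notes on version B (the rewrite author's own statement) =====
-- stated objective: alternative
-- what changed: Replaces A's single-pass start/end/None state machine (with its separate end-of-string epilogue) by staged passes: collect the 1-based positions of the set bits, detect run starts and run ends independently by zipping the position list against its shifted copies, then zip starts with ends and format.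
import Mathlib
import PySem

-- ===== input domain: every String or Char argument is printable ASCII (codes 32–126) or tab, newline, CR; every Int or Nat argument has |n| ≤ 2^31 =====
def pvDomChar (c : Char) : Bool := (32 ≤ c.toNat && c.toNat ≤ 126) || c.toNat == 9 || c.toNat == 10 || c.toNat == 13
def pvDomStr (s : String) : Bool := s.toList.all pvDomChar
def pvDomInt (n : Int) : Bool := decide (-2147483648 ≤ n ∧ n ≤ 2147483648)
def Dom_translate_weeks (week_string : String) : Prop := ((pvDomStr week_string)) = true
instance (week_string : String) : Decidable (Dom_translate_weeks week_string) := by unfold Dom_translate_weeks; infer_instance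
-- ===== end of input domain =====

-- B replaces A's single-pass start/end/None state machine by staged passes: collect the
-- 1-based positions of the set bits, detect run starts and run ends independently by zipping the
-- position list against its shifted copies, then zip starts with ends and format.
-- Objective: alternative decomposition, same cost.

-- ===== PORT A =====
-- A's loop over range(len(week_string)): recursion over the characters with the 1-based
-- position i (Python's i+1) and the state (start, end, result); branches in Python's order.
-- pvClose = the body of A's "elif start is not None" branch (append the run's text, reset);
-- the (some, none) state is unreachable in Python (end is set whenever start is).
def pvClose : (Option Int × Option Int × List String) → (Option Int × Option Int × List String)
  | (some s, some e, res) =>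
      (none, none, res ++ [if s = e then PySem.Int.toStr s else PySem.Int.toStr s ++ "-" ++ PySem.Int.toStr e])
  | (some s, none, res) => (none, none, res ++ [PySem.Int.toStr s ++ "-None"])
  | (none, stop, res) => (none, stop, res)

def translateLoopA : List Char → Int → (Option Int × Option Int × List String) → (Option Int × Option Int × List String)
  | [], _, st => st
  | c :: rest, i, (start, stop, res) =>
    if c = '1' then
      -- start = i+1 if start is None; end = i+1
      translateLoopA rest (i + 1) ((match start with | none => some i | some s => some s), some i, res)
    else
      translateLoopA rest (i + 1) (pvClose (start, stop, res))

def translate_weeks (week_string : String) : String :=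
  match translateLoopA week_string.toList 1 (none, none, []) with
  | (some s, some e, res) =>
      String.intercalate "、" (res ++ [if s = e then PySem.Int.toStr s else PySem.Int.toStr s ++ "-" ++ PySem.Int.toStr e])
  | (some s, none, res) => String.intercalate "、" (res ++ [PySem.Int.toStr s ++ "-None"])  -- unreachable in Python
  | (none, _, res) => String.intercalate "、" res

-- ===== PORT B =====
-- ones = [i + 1 for i, c in enumerate(week_string) if c == '1']
def pvOnes (cs : List Char) : List Int :=
  (PySem.List.enumerate cs 0).filterMap (fun ic => if ic.2 = '1' then some (ic.1 + 1) else none)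

-- starts = [q for p, q in zip([None] + ones, ones) if p != q - 1]   (None != int is True)
def pvStarts (ones : List Int) : List Int :=
  ((none :: ones.map some).zip ones).filterMap
    (fun pq => if pq.1 ≠ some (pq.2 - 1) then some pq.2 else none)

-- ends = [p for p, q in zip(ones, ones[1:] + [None]) if q != p + 1]
def pvEnds (ones : List Int) : List Int :=
  (ones.zip ((ones.drop 1).map some ++ [none])).filterMap
    (fun pq => if pq.2 ≠ some (pq.1 + 1) then some pq.1 else none)

-- str(s) if s == e else f"{s}-{e}"
def pvFmt (p : Int × Int) : String :=
  if p.1 = p.2 then PySem.Int.toStr p.1 else PySem.Int.toStr p.1 ++ "-" ++ PySem.Int.toStr p.2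

def translate_weeks_alt (week_string : String) : String :=
  let ones := pvOnes week_string.toList
  String.intercalate "、" (((pvStarts ones).zip (pvEnds ones)).map pvFmt)

-- ===== PRECONDITION & SPEC =====
def Spec_translate_weeks (week_string : String) (out : String) : Prop := out = translate_weeks_alt week_string
instance (week_string : String) (out : String) : Decidable (Spec_translate_weeks week_string out) := by unfold Spec_translate_weeks; infer_instance

-- ===== CLAIM (what is proved, stated in full; the proofs are below) =====
def Claim_equal_translate_weeks : Prop := ∀ (week_string : String), Dom_translate_weeks week_string → Spec_translate_weeks week_string (translate_weeks week_string)

-- ===== LEMMAS AND PROOFS =====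

-- the maximal runs of '1' as (start, end) pairs, 1-based; i = position of the head char
def pvRuns : List Char → Int → List (Int × Int)
  | [], _ => []
  | c :: rest, i =>
    let r := pvRuns rest (i + 1)
    if c = '1' then
      match r with
      | (s, e) :: t => if s = i + 1 then (i, e) :: t else (i, i) :: (s, e) :: t
      | [] => [(i, i)]
    else r

-- group a list of ints into maximal runs of consecutive values
def runsOf : List Int → List (Int × Int)
  | [] => []
  | p :: rest =>
    match runsOf rest with
    | (s, e) :: t => if s = p + 1 then (p, e) :: t else (p, p) :: (s, e) :: t
    | [] => [(p, p)]

-- tail of pvStarts: select the values not preceded by their predecessor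
def selS (prev : Option Int) : List Int → List Int
  | [] => []
  | q :: t => (if prev ≠ some (q - 1) then [q] else []) ++ selS (some q) t

-- A's epilogue ("handle trailing '1's") applied to a final state.
def pvFinish : (Option Int × Option Int × List String) → List String
  | (some s, some e, res) => res ++ [pvFmt (s, e)]
  | (some s, none, res) => res ++ [PySem.Int.toStr s ++ "-None"]
  | (none, _, res) => res

-- merge a pending run (s, e) in front of the runs of the rest (head position e+1).
def pvPend (s e : Int) : List (Int × Int) → List (Int × Int)
  | (s', e') :: t => if s' = e + 1 then (s, e') :: t else (s, e) :: (s', e') :: t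
  | [] => [(s, e)]

lemma pvRuns_head_ge : ∀ (cs : List Char) (i s e : Int) (t : List (Int × Int)),
    pvRuns cs i = (s, e) :: t → i ≤ s := by
  intro cs
  induction cs with
  | nil => intro i s e t h; simp [pvRuns] at h
  | cons c rest ih =>
    intro i s e t h
    simp only [pvRuns] at h
    by_cases hc : c = '1'
    · simp only [hc] at h
      rcases hr : pvRuns rest (i + 1) with _ | ⟨⟨s', e'⟩, t'⟩
      · rw [hr] at h; simp at h; omega
      · rw [hr] at h
        by_cases hs : s' = i + 1
        · simp [hs] at h; omega
        · simp [hs] at h; omega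
    · rw [if_neg hc] at h
      have := ih (i + 1) s e t h
      omega

lemma pvMain : ∀ (cs : List Char),
    (∀ (i : Int) (res : List String),
        pvFinish (translateLoopA cs i (none, none, res)) = res ++ (pvRuns cs i).map pvFmt)
    ∧ (∀ (e s : Int) (res : List String),
        pvFinish (translateLoopA cs (e + 1) (some s, some e, res)) = res ++ (pvPend s e (pvRuns cs (e + 1))).map pvFmt) := by
  intro cs
  induction cs with
  | nil =>
    constructor
    · intro i res; simp [translateLoopA, pvRuns, pvFinish]
    · intro e s res; simp [translateLoopA, pvRuns, pvFinish, pvPend]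
  | cons c rest ih =>
    constructor
    · intro i res
      by_cases hc : c = '1'
      · have h := ih.2 i i res
        simp only [translateLoopA, hc, reduceIte]
        rw [h]
        simp only [pvRuns, reduceIte]
        rcases hr : pvRuns rest (i + 1) with _ | ⟨⟨s', e'⟩, t'⟩
        · simp [pvPend]
        · by_cases hs : s' = i + 1 <;> simp [pvPend, hs]
      · have h := ih.1 (i + 1) res
        simp only [translateLoopA, if_neg hc, pvClose]
        rw [h]
        simp [pvRuns, hc]
    · intro e s res
      by_cases hc : c = '1'
      · have h := ih.2 (e + 1) s res
        simp only [translateLoopA, hc, reduceIte]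
        rw [h]
        simp only [pvRuns, reduceIte]
        rcases hr : pvRuns rest (e + 1 + 1) with _ | ⟨⟨s', e'⟩, t'⟩
        · simp [pvPend]
        · by_cases hs : s' = e + 1 + 1 <;> simp [pvPend, hs]
      · have h := ih.1 (e + 1 + 1) (res ++ [if s = e then PySem.Int.toStr s else PySem.Int.toStr s ++ "-" ++ PySem.Int.toStr e])
        simp only [translateLoopA, if_neg hc, pvClose]
        rw [h]
        simp only [pvRuns, if_neg hc]
        rcases hr : pvRuns rest (e + 1 + 1) with _ | ⟨⟨s', e'⟩, t'⟩
        · simp [pvPend, pvFmt]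
        · have hge := pvRuns_head_ge rest (e + 1 + 1) s' e' t' hr
          have hs : ¬ s' = e + 1 := by omega
          simp [pvPend, hs, pvFmt]

-- positions of '1' in cs, 1-based from offset i (ones = pvOnesFrom cs 0)
def pvOnesFrom : List Char → Int → List Int
  | [], _ => []
  | c :: rest, i => (if c = '1' then [i + 1] else []) ++ pvOnesFrom rest (i + 1)

lemma pvOnes_eq : ∀ (cs : List Char) (i : Int),
    (PySem.List.enumerate cs i).filterMap (fun ic => if ic.2 = '1' then some (ic.1 + 1) else none)
      = pvOnesFrom cs i := by
  intro cs
  induction cs with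
  | nil => intro i; simp [PySem.List.enumerate_nil, pvOnesFrom]
  | cons c rest ih =>
    intro i
    rw [PySem.List.enumerate_cons, List.filterMap_cons]
    by_cases hc : c = '1' <;> simp [pvOnesFrom, hc, ih (i + 1)]

lemma pvRuns_eq_runsOf : ∀ (cs : List Char) (i : Int),
    pvRuns cs (i + 1) = runsOf (pvOnesFrom cs i) := by
  intro cs
  induction cs with
  | nil => intro i; simp [pvRuns, pvOnesFrom, runsOf]
  | cons c rest ih =>
    intro i
    by_cases hc : c = '1'
    · simp only [pvRuns, pvOnesFrom, hc, reduceIte, List.singleton_append, runsOf]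
      rw [show i + 1 + 1 = (i + 1) + 1 from rfl, ih (i + 1)]
    · simp only [pvRuns, pvOnesFrom, if_neg hc, List.nil_append]
      exact ih (i + 1)

-- unfolding equations for pvStarts / pvEnds
lemma pvStarts_cons_selS : ∀ (l : List Int) (prev : Option Int),
    ((prev :: l.map some).zip l).filterMap
        (fun pq => if pq.1 ≠ some (pq.2 - 1) then some pq.2 else none)
      = selS prev l := by
  intro l
  induction l with
  | nil => intro prev; simp [selS]
  | cons q t ih =>
    intro prev
    have ihq := ih (some q)
    simp only [ne_eq, ite_not] at ihq ⊢
    by_cases h : prev = some (q - 1) <;> simp [selS, h, ihq]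

lemma pvStarts_eq (l : List Int) : pvStarts l = selS none l := by
  unfold pvStarts; exact pvStarts_cons_selS l none

lemma pvEnds_nil : pvEnds [] = [] := by simp [pvEnds]

lemma pvEnds_single (p : Int) : pvEnds [p] = [p] := by simp [pvEnds]

lemma pvEnds_cons2 (p q : Int) (t : List Int) :
    pvEnds (p :: q :: t) = (if q ≠ p + 1 then [p] else []) ++ pvEnds (q :: t) := by
  by_cases h : q = p + 1 <;> simp [pvEnds, h]

lemma runsOf_cons (p : Int) (rest : List Int) :
    runsOf (p :: rest) = (match runsOf rest with
      | (s, e) :: t => if s = p + 1 then (p, e) :: t else (p, p) :: (s, e) :: t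
      | [] => [(p, p)]) := rfl

lemma runsOf_head : ∀ (q : Int) (t : List Int),
    ∃ e rest, runsOf (q :: t) = (q, e) :: rest := by
  intro q t
  simp only [runsOf]
  rcases runsOf t with _ | ⟨⟨s, e⟩, r⟩
  · exact ⟨q, [], rfl⟩
  · by_cases h : s = q + 1
    · exact ⟨e, r, by simp [h]⟩
    · exact ⟨q, (s, e) :: r, by simp [h]⟩

-- the core: zipping our independently-computed starts and ends recovers the runs
lemma zip_starts_ends : ∀ (l : List Int),
    ((selS none l).zip (pvEnds l)) = runsOf l := by
  intro l
  induction l with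
  | nil => simp [selS, pvEnds_nil, runsOf]
  | cons p t ih =>
    rcases t with _ | ⟨q, t'⟩
    · simp [selS, pvEnds_single, runsOf]
    · -- selS none (p :: q :: t') = p :: selS (some p) (q :: t')
      have hsel : selS none (p :: q :: t') = p :: selS (some p) (q :: t') := by
        simp [selS]
      -- and selS none (q :: t') = q :: selS (some q) t'
      have hsel' : selS none (q :: t') = q :: selS (some q) t' := by
        simp [selS]
      by_cases hq : q = p + 1
      · -- run continues: start filter drops q, ends filter drops p
        have hstep : selS (some p) (q :: t') = selS (some q) t' := by
          simp [selS, hq]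
        obtain ⟨e, rest, hr⟩ := runsOf_head q t'
        rw [hsel', hr] at ih
        rcases hE : pvEnds (q :: t') with _ | ⟨e0, E'⟩
        · rw [hE] at ih; simp at ih
        · rw [hE] at ih
          simp only [List.zip_cons_cons] at ih
          have he0 : e0 = e := by
            have := List.head_eq_of_cons_eq ih; simpa using congrArg Prod.snd this
          have htail : (selS (some q) t').zip E' = rest := List.tail_eq_of_cons_eq ih
          have hends : pvEnds (p :: q :: t') = e0 :: E' := by
            rw [pvEnds_cons2, if_neg (by simp [hq]), hE]; simp
          rw [hsel, hstep, hends, List.zip_cons_cons, htail, he0]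
          conv_rhs => rw [runsOf_cons]
          rw [hr]
          simp [hq]
      · -- run breaks at p: p is both a start-boundary and an end-boundary
        have hstep : selS (some p) (q :: t') = q :: selS (some q) t' := by
          have : ¬ (some p = some (q - 1)) := by
            intro h
            apply hq
            have := Option.some.inj h
            omega
          simp [selS, this]
        have hends : pvEnds (p :: q :: t') = p :: pvEnds (q :: t') := by
          rw [pvEnds_cons2, if_pos hq]; simp
        rw [hsel, hstep, hends, List.zip_cons_cons, ← hsel', ih]
        obtain ⟨e, rest, hr⟩ := runsOf_head q t'
        conv_rhs => rw [runsOf_cons]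
        rw [hr]
        have : ¬ q = p + 1 := hq
        simp [this]

-- ===== VERDICT (by name: the statement is the Claim_ definition above) =====
theorem translate_weeks_spec : Claim_equal_translate_weeks := by
  intro ws _
  unfold Spec_translate_weeks translate_weeks translate_weeks_alt
  have hB : pvOnes ws.toList = pvOnesFrom ws.toList 0 := pvOnes_eq ws.toList 0
  have hz : ((pvStarts (pvOnes ws.toList)).zip (pvEnds (pvOnes ws.toList))) = pvRuns ws.toList 1 := by
    rw [hB, pvStarts_eq, zip_starts_ends, show (1 : Int) = 0 + 1 from rfl, pvRuns_eq_runsOf]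
  have h := (pvMain ws.toList).1 1 []
  rcases hl : translateLoopA ws.toList 1 (none, none, []) with ⟨st, en, res⟩
  rw [hl] at h
  rcases st with _ | s <;> rcases en with _ | e <;>
    simp only [pvFinish, List.nil_append] at h <;> simp only [hz] <;> rw [← h] <;> simp [pvFmt]
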